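-- pv_equiv track=rewrite | github.com/rbhoot/us_census_tools | common_utils/helper_functions.py | replace_first_token_in_column
-- ===== SOURCE A (Python) =====
-- def replace_first_token_in_column(cur_column,
--                                   old_token,
--                                   new_token,
--                                   delimiter='!!'):
--   new_list = []
--   temp_flag = True
--   for x in cur_column.split(delimiter):
--     if x == old_token and temp_flag:
--       new_list.append(new_token)
--       temp_flag = False
--     else:
--       new_list.append(x)
--
--   return delimiter.join(new_list)
-- ===== SOURCE B (Python) =====
-- def replace_first_token_in_column(cur_column,
--                                   old_token,
--                                   new_token,
--                                   delimiter='!!'):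
--   tokens = cur_column.split(delimiter)
--   if old_token in tokens:
--     tokens[tokens.index(old_token)] = new_token
--   return delimiter.join(tokens)
-- ===== Notes on version B (the rewrite author's own statement) =====
-- stated objective: idiomatic
-- what changed: Replaces the flag-guarded accumulation loop with a membership test plus a single index-based assignment into the token list before joining.
import Mathlib
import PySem

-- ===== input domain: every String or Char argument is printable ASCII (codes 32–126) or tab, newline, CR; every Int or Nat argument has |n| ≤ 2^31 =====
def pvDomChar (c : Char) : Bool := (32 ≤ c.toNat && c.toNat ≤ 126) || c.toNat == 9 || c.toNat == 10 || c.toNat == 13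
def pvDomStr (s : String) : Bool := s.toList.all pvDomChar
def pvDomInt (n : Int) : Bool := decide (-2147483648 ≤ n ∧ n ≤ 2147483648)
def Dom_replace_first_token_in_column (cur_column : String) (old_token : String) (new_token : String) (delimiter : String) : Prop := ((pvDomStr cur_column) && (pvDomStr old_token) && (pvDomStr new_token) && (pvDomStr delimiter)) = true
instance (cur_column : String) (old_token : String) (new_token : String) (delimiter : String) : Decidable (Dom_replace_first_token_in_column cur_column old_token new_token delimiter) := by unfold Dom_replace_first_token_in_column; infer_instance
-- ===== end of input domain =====

-- B replaces A's flag-guarded accumulation loop with a membership test plus one index-based assignment (idiomatic; same cost).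


-- ===== PORT A =====
def replace_first_token_in_column (cur_column : String) (old_token : String) (new_token : String) (delimiter : String) : String :=
  match PySem.Str.split? cur_column delimiter with
  | none => ""   -- ValueError('empty separator'): excluded by Pre_
  | some toks =>
    -- new_list = []; temp_flag = True; for x in …: …
    let st := toks.foldl (fun (s : List String × Bool) x =>
      if x = old_token ∧ s.2 = true then (s.1 ++ [new_token], false)
      else (s.1 ++ [x], s.2)) ([], true)
    PySem.Str.join delimiter st.1

-- ===== PORT B =====
def replace_first_token_in_column_alt (cur_column : String) (old_token : String) (new_token : String) (delimiter : String) : String :=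
  match PySem.Str.split? cur_column delimiter with
  | none => ""   -- ValueError('empty separator'): excluded by Pre_
  | some toks =>
    -- if old_token in tokens: tokens[tokens.index(old_token)] = new_token
    let toks' := match PySem.List.index? toks old_token with
      | some i => toks.set i new_token
      | none => toks
    PySem.Str.join delimiter toks'

-- ===== PRECONDITION & SPEC =====
-- Pre_ excludes only delimiter = "", on which Python's str.split raises ValueError (in both A and B).
def Pre_replace_first_token_in_column (cur_column : String) (old_token : String) (new_token : String) (delimiter : String) : Prop := delimiter ≠ ""
instance (cur_column : String) (old_token : String) (new_token : String) (delimiter : String) : Decidable (Pre_replace_first_token_in_column cur_column old_token new_token delimiter) := by unfold Pre_replace_first_token_in_column; infer_instance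
def pvWitness_replace_first_token_in_column : String × String × String × String := ("a!!b!!a", "a", "c", "!!")
def Spec_replace_first_token_in_column (cur_column : String) (old_token : String) (new_token : String) (delimiter : String) (out : String) : Prop := out = replace_first_token_in_column_alt cur_column old_token new_token delimiter
instance (cur_column : String) (old_token : String) (new_token : String) (delimiter : String) (out : String) : Decidable (Spec_replace_first_token_in_column cur_column old_token new_token delimiter out) := by unfold Spec_replace_first_token_in_column; infer_instance

-- ===== CLAIM (what is proved, stated in full; the proofs are below) =====
def Claim_equal_replace_first_token_in_column : Prop := ∀ (cur_column : String) (old_token : String) (new_token : String) (delimiter : String), Dom_replace_first_token_in_column cur_column old_token new_token delimiter → Pre_replace_first_token_in_column cur_column old_token new_token delimiter → Spec_replace_first_token_in_column cur_column old_token new_token delimiter (replace_first_token_in_column cur_column old_token new_token delimiter)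

-- ===== LEMMAS AND PROOFS =====

-- A's loop starting with flag=true produces exactly B's set-at-first-index list (prepended with the accumulator).
theorem pvALoop_char (o n : String) :
    ∀ (toks acc : List String) (flag : Bool),
      (toks.foldl (fun (s : List String × Bool) x =>
        if x = o ∧ s.2 = true then (s.1 ++ [n], false)
        else (s.1 ++ [x], s.2)) (acc, flag)).1
      = acc ++ (if flag then
          (match PySem.List.index? toks o with
           | some i => toks.set i n
           | none => toks)
         else toks) := by
  intro toks
  induction toks with
  | nil => intro acc flag; cases flag <;> simp [PySem.List.index?]
  | cons x xs ih =>
    intro acc flag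
    cases flag with
    | false =>
      simp only [List.foldl_cons]
      rw [if_neg (by simp)]
      rw [ih]
      simp
    | true =>
      simp only [List.foldl_cons]
      by_cases hx : x = o
      · subst hx
        rw [if_pos (by simp)]
        rw [ih]
        rw [PySem.List.index?_cons_self]
        simp
      · rw [if_neg (by simp [hx])]
        rw [ih]
        rw [PySem.List.index?_cons_of_ne xs hx]
        cases PySem.List.index? xs o <;> simp

-- ===== VERDICT (by name: the statement is the Claim_ definition above) =====
theorem replace_first_token_in_column_spec : Claim_equal_replace_first_token_in_column := by
  intro cc o n d _ _
  unfold Spec_replace_first_token_in_column replace_first_token_in_column replace_first_token_in_column_alt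
  cases h : PySem.Str.split? cc d with
  | none => rfl
  | some toks =>
    simp only []
    rw [pvALoop_char o n toks [] true]
    simp
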